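-- pv_equiv track=rewrite | github.com/Mrmaxmeier/stuff | gdb_fmtdbg.py | clippy_str
-- ===== SOURCE A (Python) =====
-- def ansi_aware_len(s):
-- 	i = 0
-- 	l = 0
-- 	while "\033" in s[i:]:
-- 		x = s.index("\033", i)
-- 		l += x - i
-- 		i = x
-- 		i = s.index("m", i)+1
-- 	return l + len(s[i:])
--
-- def clippy_str(lines):
-- 	clippy = r"""
--  __
-- /  \
-- |  |
-- @  @
-- || ||
-- || ||   <--
-- |\_/|
-- \___/
-- """.splitlines()
-- 	clippy_width = max(map(len, clippy))
-- 	box_height = len(lines) + 3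
-- 	box_width = max(map(ansi_aware_len, lines)) + 4
-- 	height = max(box_height, len(clippy))
-- 	clippy_start = height - len(clippy)
-- 	box_start = max(len(clippy) - box_height, 0)
-- 	s = ""
-- 	for i in range(height):
-- 		if i >= clippy_start:
-- 			s += clippy[i-clippy_start].ljust(clippy_width)
-- 		else:
-- 			s += " " * clippy_width
-- 		if i == box_start:
-- 			s += " " + "_"*(box_width-2)
-- 		elif i == box_start+1:
-- 			s += "/" + " "*(box_width-2) + "\\"
-- 		elif i == height-1:
-- 			s += "\\" + "_"*(box_width-2) + "/"
-- 		elif i >= box_start: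
-- 			line = lines[i-box_start-2]
-- 			s += "| " + line + " "*(box_width-4-ansi_aware_len(line)) + " |"
-- 		s += "\n"
-- 	return s
-- ===== SOURCE B (Python) =====
-- def ansi_aware_len(s):
-- 	i = 0
-- 	l = 0
-- 	while "\033" in s[i:]:
-- 		x = s.index("\033", i)
-- 		l += x - i
-- 		i = x
-- 		i = s.index("m", i)+1
-- 	return l + len(s[i:])
--
-- def clippy_str(lines):
-- 	clippy = r"""
--  __
-- /  \
-- |  |
-- @  @
-- || ||
-- || ||   <--
-- |\_/|
-- \___/
-- """.splitlines()
-- 	clippy_width = max(map(len, clippy))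
-- 	box_height = len(lines) + 3
-- 	box_width = max(map(ansi_aware_len, lines)) + 4
-- 	height = max(box_height, len(clippy))
-- 	box_lines = [" " + "_" * (box_width - 2),
-- 	             "/" + " " * (box_width - 2) + "\\",
-- 	             *("| " + ln + " " * (box_width - 4 - ansi_aware_len(ln)) + " |" for ln in lines),
-- 	             "\\" + "_" * (box_width - 2) + "/"]
-- 	clippy_col = [" " * clippy_width] * (height - len(clippy)) + [c.ljust(clippy_width) for c in clippy]
-- 	box_col = [""] * (height - box_height) + box_lines
-- 	return "".join(c + b + "\n" for c, b in zip(clippy_col, box_col))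
-- ===== Notes on version B (the rewrite author's own statement) =====
-- stated objective: simpler
-- what changed: Replaces A's single row loop that branches on the row index with two independently built column lists (the clippy column and the box column) that are zipped and joined row by row.
-- outside the precondition, e.g. on clippy_str([]): A raises ValueError, B raises ValueError
import Mathlib
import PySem

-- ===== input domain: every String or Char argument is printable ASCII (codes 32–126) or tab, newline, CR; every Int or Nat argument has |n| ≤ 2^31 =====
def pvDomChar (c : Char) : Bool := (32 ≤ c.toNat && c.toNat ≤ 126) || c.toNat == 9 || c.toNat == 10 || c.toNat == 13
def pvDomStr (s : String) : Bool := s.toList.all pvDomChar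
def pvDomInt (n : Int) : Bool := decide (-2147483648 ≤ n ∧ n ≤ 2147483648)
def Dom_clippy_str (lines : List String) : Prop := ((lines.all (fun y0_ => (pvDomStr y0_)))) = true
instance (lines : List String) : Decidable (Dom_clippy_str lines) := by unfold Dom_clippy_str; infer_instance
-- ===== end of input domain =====

-- B builds the clippy column and the box column as two independent lists and zips them,
-- instead of A's single loop branching on the row index (objective: simpler decomposition).

-- ===== shared primitive helpers (ports of Python's `c*n` and `str.ljust`, used by BOTH sources) =====
-- Python `c * n` for a one-char string: empty when n ≤ 0
def pvStrRep (c : Char) (n : Int) : String := String.ofList (List.replicate n.toNat c)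
-- Python `s.ljust(w)`
def pvLjust (s : String) (w : Int) : String := s ++ pvStrRep ' ' (w - PySem.Str.len s)

-- ===== PORT A =====
-- ansi_aware_len, shared verbatim by both Python sources; fuel = |s|+1 bounds the while loop
-- (i strictly increases each iteration; Python's s.index raising ValueError — no 'm' after an
-- ESC — cannot occur on the ASCII domain, where '\x1b' never appears).
def pvAalLoop (cs : List Char) (fuel : Nat) (i l : Int) : Int :=
  match fuel with
  | 0 => l + PySem.Chars.len (PySem.Chars.slice cs (some i) none)
  | fuel + 1 =>
    if PySem.Chars.isIn ['\x1b'] (PySem.Chars.slice cs (some i) none) then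
      let x := PySem.Chars.findFrom cs ['\x1b'] i
      let l := l + (x - i)
      let i := x
      let i := PySem.Chars.findFrom cs ['m'] i + 1
      pvAalLoop cs fuel i l
    else l + PySem.Chars.len (PySem.Chars.slice cs (some i) none)

def ansiAwareLen (s : String) : Int := pvAalLoop s.toList (s.toList.length + 1) 0 0

def clippy_str (lines : List String) : String :=
  let clippy := PySem.Str.splitlines "\n __\n/  \\\n|  |\n@  @\n|| ||\n|| ||   <--\n|\\_/|\n\\___/\n"
  let clippy_width : Int := (PySem.List.max? (clippy.map PySem.Str.len) (fun x => x)).getD 0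
  let box_height : Int := (lines.length : Int) + 3
  -- Python's max() raises ValueError on lines = []: excluded by Pre_; .getD 0 is never read inside Pre_
  let box_width : Int := (PySem.List.max? (lines.map ansiAwareLen) (fun x => x)).getD 0 + 4
  let height : Int := max box_height (clippy.length : Int)
  let clippy_start : Int := height - (clippy.length : Int)
  let box_start : Int := max ((clippy.length : Int) - box_height) 0
  (PySem.List.pyRange 0 height 1).foldl (fun s i =>
    let s := s ++ (if clippy_start ≤ i then
                     pvLjust ((PySem.List.pyGet? clippy (i - clippy_start)).getD "") clippy_width
                   else pvStrRep ' ' clippy_width)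
    let s :=
      if i = box_start then s ++ (" " ++ pvStrRep '_' (box_width - 2))
      else if i = box_start + 1 then s ++ ("/" ++ pvStrRep ' ' (box_width - 2) ++ "\\")
      else if i = height - 1 then s ++ ("\\" ++ pvStrRep '_' (box_width - 2) ++ "/")
      else if box_start ≤ i then
        let line := (PySem.List.pyGet? lines (i - box_start - 2)).getD ""
        s ++ ("| " ++ line ++ pvStrRep ' ' (box_width - 4 - ansiAwareLen line) ++ " |")
      else s
    s ++ "\n") ""

-- ===== PORT B =====
def clippy_str_alt (lines : List String) : String :=
  let clippy := PySem.Str.splitlines "\n __\n/  \\\n|  |\n@  @\n|| ||\n|| ||   <--\n|\\_/|\n\\___/\n"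
  let clippy_width : Int := (PySem.List.max? (clippy.map PySem.Str.len) (fun x => x)).getD 0
  let box_height : Int := (lines.length : Int) + 3
  let box_width : Int := (PySem.List.max? (lines.map ansiAwareLen) (fun x => x)).getD 0 + 4
  let height : Int := max box_height (clippy.length : Int)
  let box_lines : List String :=
    (" " ++ pvStrRep '_' (box_width - 2)) ::
    ("/" ++ pvStrRep ' ' (box_width - 2) ++ "\\") ::
    (lines.map (fun ln => "| " ++ ln ++ pvStrRep ' ' (box_width - 4 - ansiAwareLen ln) ++ " |")
      ++ ["\\" ++ pvStrRep '_' (box_width - 2) ++ "/"])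
  let clippy_col : List String :=
    PySem.List.pyRepeat [pvStrRep ' ' clippy_width] (height - (clippy.length : Int))
      ++ clippy.map (fun c => pvLjust c clippy_width)
  let box_col : List String := PySem.List.pyRepeat [("" : String)] (height - box_height) ++ box_lines
  String.join (List.zipWith (fun c b => c ++ (b ++ "\n")) clippy_col box_col)

-- ===== PRECONDITION & SPEC =====
-- Python A raises ValueError ('max() of empty sequence') on lines = []; that is the only failing input.
def Pre_clippy_str (lines : List String) : Prop := lines ≠ []
instance (lines : List String) : Decidable (Pre_clippy_str lines) := by unfold Pre_clippy_str; infer_instance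
def pvWitness_clippy_str : List String := (["hi"])

def Spec_clippy_str (lines : List String) (out : String) : Prop := out = clippy_str_alt lines
instance (lines : List String) (out : String) : Decidable (Spec_clippy_str lines out) := by unfold Spec_clippy_str; infer_instance

-- ===== CLAIM (what is proved, stated in full; the proofs are below) =====
def Claim_equal_clippy_str : Prop := ∀ (lines : List String), Dom_clippy_str lines → Pre_clippy_str lines → Spec_clippy_str lines (clippy_str lines)

-- ===== LEMMAS AND PROOFS =====

def cLits : List String := ["", " __", "/  \\", "|  |", "@  @", "|| ||", "|| ||   <--", "|\\_/|", "\\___/"]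

lemma clippy_eval : PySem.Str.splitlines "\n __\n/  \\\n|  |\n@  @\n|| ||\n|| ||   <--\n|\\_/|\n\\___/\n" = cLits := by decide

-- A's i-th output row, as one string
def rowA (cs bs H bw : Int) (L : List String) (i : Int) : String :=
  (if cs ≤ i then pvLjust ((PySem.List.pyGet? cLits (i - cs)).getD "") 11 else pvStrRep ' ' 11) ++
  ((if i = bs then " " ++ pvStrRep '_' (bw - 2)
    else if i = bs + 1 then "/" ++ pvStrRep ' ' (bw - 2) ++ "\\"
    else if i = H - 1 then "\\" ++ pvStrRep '_' (bw - 2) ++ "/"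
    else if bs ≤ i then
      let line := (PySem.List.pyGet? L (i - bs - 2)).getD ""
      "| " ++ line ++ pvStrRep ' ' (bw - 4 - ansiAwareLen line) ++ " |"
    else "") ++ "\n")

lemma foldl_append_str (t : List String) :
    ∀ (a : String), t.foldl (fun r s => r ++ s) a = a ++ t.foldl (fun r s => r ++ s) "" := by
  induction t with
  | nil => intro a; simp
  | cons x t ih =>
    intro a
    simp only [List.foldl_cons]
    rw [ih ("" ++ x), ih (a ++ x)]
    simp [String.append_assoc]

lemma join_cons (x : String) (t : List String) : String.join (x :: t) = x ++ String.join t := by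
  simp only [String.join, List.foldl_cons]
  rw [foldl_append_str t ("" ++ x)]
  simp

-- A's loop appends rowA for each i
lemma foldA (cs bs H bw : Int) (L : List String) :
    ∀ (l : List Int) (s : String),
    l.foldl (fun s i =>
      let s := s ++ (if cs ≤ i then pvLjust ((PySem.List.pyGet? cLits (i - cs)).getD "") 11
                     else pvStrRep ' ' 11)
      let s :=
        if i = bs then s ++ (" " ++ pvStrRep '_' (bw - 2))
        else if i = bs + 1 then s ++ ("/" ++ pvStrRep ' ' (bw - 2) ++ "\\")
        else if i = H - 1 then s ++ ("\\" ++ pvStrRep '_' (bw - 2) ++ "/")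
        else if bs ≤ i then
          let line := (PySem.List.pyGet? L (i - bs - 2)).getD ""
          s ++ ("| " ++ line ++ pvStrRep ' ' (bw - 4 - ansiAwareLen line) ++ " |")
        else s
      s ++ "\n") s
    = s ++ String.join (l.map (rowA cs bs H bw L)) := by
  intro l
  induction l with
  | nil => intro s; simp [String.join]
  | cons i t ih =>
    intro s
    simp only [List.foldl_cons, List.map_cons, join_cons, ih]
    have hrow : (let s1 := s ++ (if cs ≤ i then pvLjust ((PySem.List.pyGet? cLits (i - cs)).getD "") 11
                     else pvStrRep ' ' 11)
                 let s2 :=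
                   if i = bs then s1 ++ (" " ++ pvStrRep '_' (bw - 2))
                   else if i = bs + 1 then s1 ++ ("/" ++ pvStrRep ' ' (bw - 2) ++ "\\")
                   else if i = H - 1 then s1 ++ ("\\" ++ pvStrRep '_' (bw - 2) ++ "/")
                   else if bs ≤ i then
                     let line := (PySem.List.pyGet? L (i - bs - 2)).getD ""
                     s1 ++ ("| " ++ line ++ pvStrRep ' ' (bw - 4 - ansiAwareLen line) ++ " |")
                   else s1
                 s2 ++ "\n") = s ++ rowA cs bs H bw L i := by
      simp only [rowA]
      split_ifs <;> simp [String.append_assoc]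
    rw [hrow, String.append_assoc]

-- rows k of the two column lists of B, zipped, are exactly A's rows
lemma listEq (L : List String) (hL : L ≠ []) (bw : Int) :
    (PySem.List.pyRange 0 (max ((L.length : Int) + 3) (cLits.length : Int))).map
      (rowA (max ((L.length : Int) + 3) (cLits.length : Int) - (cLits.length : Int))
            (max ((cLits.length : Int) - ((L.length : Int) + 3)) 0)
            (max ((L.length : Int) + 3) (cLits.length : Int)) bw L)
    = List.zipWith (fun c b => c ++ (b ++ "\n"))
        (PySem.List.pyRepeat [pvStrRep ' ' 11]
            (max ((L.length : Int) + 3) (cLits.length : Int) - (cLits.length : Int))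
          ++ cLits.map (fun c => pvLjust c 11))
        (PySem.List.pyRepeat [("" : String)]
            (max ((L.length : Int) + 3) (cLits.length : Int) - ((L.length : Int) + 3))
          ++ ((" " ++ pvStrRep '_' (bw - 2)) ::
              ("/" ++ pvStrRep ' ' (bw - 2) ++ "\\") ::
              (L.map (fun ln => "| " ++ ln ++ pvStrRep ' ' (bw - 4 - ansiAwareLen ln) ++ " |")
                ++ ["\\" ++ pvStrRep '_' (bw - 2) ++ "/"]))) := by
  have hn : 0 < L.length := List.length_pos_of_ne_nil hL
  have h9 : cLits.length = 9 := rfl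
  set n := L.length with hn'
  have hH : max ((n : Int) + 3) ((9 : Nat) : Int) = ((max (n + 3) 9 : Nat) : Int) := by omega
  have hbs : max (((9 : Nat) : Int) - ((n : Int) + 3)) 0
      = ((max (n + 3) 9 - (n + 3) : Nat) : Int) := by omega
  set H := max (n + 3) 9 with hHdef
  set B0 := H - (n + 3) with hB0def
  simp only [h9]
  rw [hH, hbs]
  have ht1 : ((H : Int) - ((9 : Nat) : Int)).toNat = H - 9 := by omega
  have ht2 : ((H : Int) - ((n : Int) + 3)).toNat = B0 := by omega
  rw [PySem.List.pyRepeat_singleton, PySem.List.pyRepeat_singleton, ht1, ht2]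
  rw [PySem.List.pyRange_zero_natCast, List.map_map]
  apply List.ext_getElem
  · simp [cLits]
    omega
  · intro k hk hk2
    simp only [List.length_map, List.length_range] at hk
    simp only [List.getElem_map, List.getElem_range, Function.comp_apply, List.getElem_zipWith]
    unfold rowA
    congr 1
    · -- clippy column
      by_cases hc : k < H - 9
      · rw [if_neg (by omega), List.getElem_append_left (by simpa using hc),
          List.getElem_replicate]
      · rw [if_pos (by omega), List.getElem_append_right (by simp; omega)]
        rw [show ((k : Int) - ((H : Int) - ((9 : Nat) : Int))) = ((k - (H - 9) : Nat) : Int) by omega]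
        rw [PySem.List.pyGet?_natCast,
          List.getElem?_eq_getElem (by simp [cLits]; omega : k - (H - 9) < cLits.length)]
        simp
    · congr 1
      -- box column
      by_cases h1 : k < B0
      · rw [if_neg (by omega), if_neg (by omega), if_neg (by omega), if_neg (by omega),
          List.getElem_append_left (by simp; omega), List.getElem_replicate]
      · rw [List.getElem_append_right (by simp; omega)]
        simp only [List.length_replicate]
        by_cases h2 : k = B0
        · rw [if_pos (by omega)]
          simp only [show k - B0 = 0 from by omega, List.getElem_cons_zero]
        · by_cases h3 : k = B0 + 1
          · rw [if_neg (by omega), if_pos (by omega)]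
            simp only [show k - B0 = 1 from by omega]
            simp
          · by_cases h4 : k = H - 1
            · rw [if_neg (by omega), if_neg (by omega), if_pos (by omega)]
              simp only [show k - B0 = n + 2 from by omega, List.getElem_cons_succ]
              rw [List.getElem_append_right (by simp; omega), List.getElem_singleton]
            · rw [if_neg (by omega), if_neg (by omega), if_neg (by omega), if_pos (by omega)]
              obtain ⟨m, hm⟩ : ∃ m, k - B0 = m + 2 := ⟨k - B0 - 2, by omega⟩
              simp only [hm, List.getElem_cons_succ]
              rw [List.getElem_append_left (by simp; omega)]
              rw [show ((k : Int) - ((B0 : Nat) : Int) - 2) = ((m : Nat) : Int) by omega]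
              rw [PySem.List.pyGet?_natCast,
                List.getElem?_eq_getElem (by omega : m < L.length)]
              simp

-- ===== VERDICT (by name: the statement is the Claim_ definition above) =====
theorem clippy_str_spec : Claim_equal_clippy_str := by
  intro L _hD hL
  unfold Spec_clippy_str clippy_str clippy_str_alt
  rw [clippy_eval]
  refine Eq.trans
    (foldA (max ((L.length : Int) + 3) (cLits.length : Int) - (cLits.length : Int))
      (max ((cLits.length : Int) - ((L.length : Int) + 3)) 0)
      (max ((L.length : Int) + 3) (cLits.length : Int))
      ((PySem.List.max? (L.map ansiAwareLen) (fun x => x)).getD 0 + 4) L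
      (PySem.List.pyRange 0 (max ((L.length : Int) + 3) (cLits.length : Int))) "") ?_
  rw [String.empty_append]
  exact congrArg String.join (listEq L hL ((PySem.List.max? (L.map ansiAwareLen) (fun x => x)).getD 0 + 4))
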